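-- pv_equiv track=rewrite | github.com/mjacquot1/algorithms | arrays/sliding_window.py | repeating_patterns_k_length
-- ===== SOURCE A (Python) =====
-- def repeating_patterns_k_length(s, k):
--
--     patterns = set()
--
--     ret_set = set()
--
--     for i in range(k-1, len(s)):
--
--         window = s[i-(k-1):i+1]
--
--         if window in patterns:
--             ret_set.add(window)
--         else:
--             patterns.add(window)
--
--     return list(ret_set)
-- ===== SOURCE B (Python) =====
-- def repeating_patterns_k_length(s, k):
--     ws = [s[j:j + k] for j in range(len(s) - k + 1)]
--     order = sorted(range(len(ws)), key=lambda j: (ws[j], j))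
--     seconds = []
--     for i in range(1, len(order)):
--         if ws[order[i - 1]] == ws[order[i]] and (i < 2 or ws[order[i - 2]] != ws[order[i]]):
--             seconds.append(order[i])
--     seconds.sort()
--     return [ws[j] for j in seconds]
-- ===== Notes on version B (the rewrite author's own statement) =====
-- stated objective: alternative
-- what changed: B replaces A's single hash-set sliding pass by a sort-based algorithm: it sorts the window start indices by (window, index), marks each window value's second occurrence by adjacency in the sorted order, and emits the marked windows back in start-index order.
import Mathlib
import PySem

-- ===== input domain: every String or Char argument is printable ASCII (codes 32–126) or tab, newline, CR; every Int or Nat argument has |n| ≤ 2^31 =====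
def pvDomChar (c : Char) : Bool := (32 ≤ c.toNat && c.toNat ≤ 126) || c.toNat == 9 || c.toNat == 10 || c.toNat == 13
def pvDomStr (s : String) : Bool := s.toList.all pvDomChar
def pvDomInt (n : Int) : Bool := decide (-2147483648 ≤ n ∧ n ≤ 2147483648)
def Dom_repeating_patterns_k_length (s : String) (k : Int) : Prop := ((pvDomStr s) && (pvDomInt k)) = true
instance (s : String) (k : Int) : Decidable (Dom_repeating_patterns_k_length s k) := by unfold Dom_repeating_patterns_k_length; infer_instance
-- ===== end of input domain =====

-- B replaces A's single hash-set sliding pass by a sort-based algorithm: sort the window start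
-- indices by (window, index), mark each window value's second occurrence by adjacency in the
-- sorted order, and sort those marks back (objective: alternative; not claimed faster).
-- Python A returns list(ret_set), whose element ORDER is CPython hash order (outputs are
-- compared as sets); the port of A lists the set's elements in insertion order.

-- ===== PORT A =====
def repeating_patterns_k_length (s : String) (k : Int) : List String :=
  let res := (PySem.List.pyRange (k - 1) (PySem.Str.len s) 1).foldl
    (fun (st : PySem.Set String × PySem.Set String) i =>
      let window := PySem.Str.slice s (some (i - (k - 1))) (some (i + 1))
      if st.1.contains window then (st.1, st.2.add window)
      else (st.1.add window, st.2))
    (PySem.Set.empty, PySem.Set.empty)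
  res.2

-- ===== PORT B =====
def repeating_patterns_k_length_alt (s : String) (k : Int) : List String :=
  let ws := (PySem.List.pyRange 0 (PySem.Str.len s - k + 1) 1).map
    (fun j => PySem.Str.slice s (some j) (some (j + k)))
  let order := PySem.List.sorted2 (PySem.List.pyRange 0 ((ws.length : Int)) 1)
    (fun j => PySem.List.pyGetD ws j "") (fun j => j)
  let seconds := (PySem.List.pyRange 1 ((order.length : Int)) 1).foldl
    (fun (acc : List Int) i =>
      if (PySem.List.pyGetD ws (PySem.List.pyGetD order (i - 1) 0) ""
            == PySem.List.pyGetD ws (PySem.List.pyGetD order i 0) "")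
         && (decide (i < 2)
            || !(PySem.List.pyGetD ws (PySem.List.pyGetD order (i - 2) 0) ""
                  == PySem.List.pyGetD ws (PySem.List.pyGetD order i 0) ""))
      then acc ++ [PySem.List.pyGetD order i 0] else acc) []
  let sortedSeconds := PySem.List.sorted seconds (fun j => j)
  sortedSeconds.map (fun j => PySem.List.pyGetD ws j "")

-- ===== PRECONDITION & SPEC =====
def Spec_repeating_patterns_k_length (s : String) (k : Int) (out : List String) : Prop := out = repeating_patterns_k_length_alt s k
instance (s : String) (k : Int) (out : List String) : Decidable (Spec_repeating_patterns_k_length s k out) := by unfold Spec_repeating_patterns_k_length; infer_instance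

-- ===== CLAIM (what is proved, stated in full; the proofs are below) =====
def Claim_equal_repeating_patterns_k_length : Prop := ∀ (s : String) (k : Int), Dom_repeating_patterns_k_length s k → Spec_repeating_patterns_k_length s k (repeating_patterns_k_length s k)

-- ===== LEMMAS AND PROOFS =====

def pvIdxs (ws : List String) : List Int := PySem.List.pyRange 0 ((ws.length : Int)) 1
def pvKey (ws : List String) (j : Int) : Lex (String × Int) := toLex (PySem.List.pyGetD ws j "", j)
def pvOrder (ws : List String) : List Int := PySem.List.sorted (pvIdxs ws) (pvKey ws)
def pvCondB (ws : List String) (order : List Int) (i : Int) : Bool :=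
  (PySem.List.pyGetD ws (PySem.List.pyGetD order (i - 1) 0) ""
     == PySem.List.pyGetD ws (PySem.List.pyGetD order i 0) "")
  && (decide (i < 2)
     || !(PySem.List.pyGetD ws (PySem.List.pyGetD order (i - 2) 0) ""
           == PySem.List.pyGetD ws (PySem.List.pyGetD order i 0) ""))
def pvSeconds (ws : List String) : List Int :=
  ((PySem.List.pyRange 1 (((pvOrder ws).length : Int)) 1).filter (pvCondB ws (pvOrder ws))).map
    (fun i => PySem.List.pyGetD (pvOrder ws) i 0)

-- The common window sequence, indexed by start position (B's indexing).
def pvWindows (s : String) (k : Int) : List String :=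
  (List.range (PySem.Str.len s - k + 1).toNat).map
    (fun (t : Nat) => PySem.Str.slice s (some ((t : Int))) (some ((t : Int) + k)))

-- value of window at Int index j
def pvVal (ws : List String) (j : Int) : String := PySem.List.pyGetD ws j ""

-- number of earlier windows equal to the one at index j
def pvCnt (ws : List String) (j : Int) : Nat := (ws.take j.toNat).count (pvVal ws j)

-- the indices that are exactly the SECOND occurrence of their window value, ascending
def pvSecIdx (ws : List String) : List Int :=
  (PySem.List.pyRange 0 ((ws.length : Int)) 1).filter (fun j => pvCnt ws j == 1)

-- A's loop body, abstracted over the window string it looks at.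
def pvStepA (st : PySem.Set String × PySem.Set String) (w : String) :
    PySem.Set String × PySem.Set String :=
  if st.1.contains w then (st.1, st.2.add w) else (st.1.add w, st.2)

-- second occurrences of the suffix l, given the already-seen prefix pre
def pvSecondList (pre : List String) : List String → List String
  | [] => []
  | w :: l => (if pre.count w = 1 then [w] else []) ++ pvSecondList (pre ++ [w]) l

-- A's end-indexed windows are the same strings as B's start-indexed ones (i = j + (k-1)).
lemma pvReindexA (s : String) (k : Int) :
    (PySem.List.pyRange (k - 1) (PySem.Str.len s) 1).map
      (fun i => PySem.Str.slice s (some (i - (k - 1))) (some (i + 1))) = pvWindows s k := by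
  rw [PySem.List.pyRange_one, List.map_map]
  unfold pvWindows
  have hN : (PySem.Str.len s - (k - 1)).toNat = (PySem.Str.len s - k + 1).toNat := by
    congr 1; ring
  rw [hN]
  apply List.map_congr_left
  intro t _
  simp only [Function.comp]
  have h1 : k - 1 + (t : Int) - (k - 1) = (t : Int) := by ring
  have h2 : k - 1 + (t : Int) + 1 = (t : Int) + k := by ring
  rw [h1, h2]

lemma pvReindexB (s : String) (k : Int) :
    (PySem.List.pyRange 0 (PySem.Str.len s - k + 1) 1).map
      (fun j => PySem.Str.slice s (some j) (some (j + k))) = pvWindows s k := by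
  rw [PySem.List.pyRange_one, List.map_map]
  unfold pvWindows
  have hN : (PySem.Str.len s - k + 1 - 0).toNat = (PySem.Str.len s - k + 1).toNat := by
    congr 1; ring
  rw [hN]
  apply List.map_congr_left
  intro t _
  simp only [Function.comp]
  have h1 : (0 : Int) + (t : Int) = (t : Int) := by ring
  rw [h1]

-- A's fold, with the count-based invariant.
lemma pvFoldA (l : List String) :
    ∀ (pre : List String) (p r : PySem.Set String),
    (∀ w, w ∈ p ↔ 1 ≤ pre.count w) → (∀ w, w ∈ r ↔ 2 ≤ pre.count w) →
    (l.foldl pvStepA (p, r)).2 = (r : List String) ++ pvSecondList pre l := by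
  induction l with
  | nil => intro pre p r _ _; simp [pvSecondList]
  | cons w l ih =>
    intro pre p r hp hr
    rw [List.foldl_cons, pvSecondList]
    have hcnt : ∀ v, (pre ++ [w]).count v = pre.count v + (if v = w then 1 else 0) := by
      intro v; simp [List.count_append, List.count_singleton]; split_ifs with h1 h2 <;> simp_all
    by_cases hw : w ∈ p
    · have hg1 : 1 ≤ pre.count w := (hp w).mp hw
      have hA : pvStepA (p, r) w = (p, r.add w) := by simp [pvStepA, hw]
      rw [hA]
      by_cases hg2 : 2 ≤ pre.count w
      · have hwr : w ∈ r := (hr w).mpr hg2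
        rw [PySem.Set.add_eq_ite, if_pos hwr]
        have hif : (if pre.count w = 1 then [w] else []) = ([] : List String) := by
          rw [if_neg]; omega
        rw [hif]
        refine ih _ _ _ ?_ ?_
        · intro v; rw [hcnt]; split_ifs with h
          · subst v; constructor
            · intro _; omega
            · intro _; exact hw
          · simpa using hp v
        · intro v; rw [hcnt]; split_ifs with h
          · subst v; constructor
            · intro _; omega
            · intro _; exact hwr
          · simpa using hr v
      · have hg : pre.count w = 1 := by omega
        have hwr : w ∉ r := fun hx => hg2 ((hr w).mp hx)
        rw [PySem.Set.add_eq_ite, if_neg hwr, if_pos hg]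
        have := ih (pre ++ [w]) p (r ++ [w]) ?_ ?_
        · rw [this, List.append_assoc]
        · intro v; rw [hcnt]; split_ifs with h
          · subst v; constructor
            · intro _; omega
            · intro _; exact hw
          · simpa using hp v
        · intro v; rw [hcnt]
          simp only [List.mem_append, List.mem_singleton]
          split_ifs with h
          · subst v; constructor
            · intro _; omega
            · intro _; exact Or.inr rfl
          · constructor
            · rintro (hv | rfl)
              · have := (hr v).mp hv; omega
              · exact absurd rfl h
            · intro hv; refine Or.inl ((hr v).mpr (by omega))
    · have hg0 : pre.count w = 0 := by
        have h1 : ¬ 1 ≤ pre.count w := fun hx => hw ((hp w).mpr hx)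
        omega
      have hA : pvStepA (p, r) w = (p.add w, r) := by simp [pvStepA, hw]
      rw [hA, if_neg (by omega)]
      refine ih _ _ _ ?_ ?_
      · intro v; rw [hcnt, PySem.Set.mem_add]; split_ifs with h
        · subst v; constructor
          · intro _; omega
          · intro _; exact Or.inr rfl
        · constructor
          · rintro (hv | rfl)
            · have := (hp v).mp hv; omega
            · exact absurd rfl h
          · intro hv; exact Or.inl ((hp v).mpr (by simpa using hv))
      · intro v; rw [hcnt]; split_ifs with h
        · subst v; constructor
          · intro hv; have := (hr w).mp hv; omega
          · intro hv; omega
        · simpa using hr v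

-- pvSecondList as a filter over positions
lemma pvSecondList_eq (l : List String) :
    ∀ pre, pvSecondList pre l
      = ((List.range l.length).filter
          (fun t => (pre ++ l.take t).count (l.getD t "") == 1)).map (fun t => l.getD t "") := by
  induction l with
  | nil => intro pre; simp [pvSecondList]
  | cons w l ih =>
    intro pre
    rw [pvSecondList, List.length_cons, List.range_succ_eq_map, List.filter_cons, List.filter_map]
    have hc : ((fun t => ((pre ++ (w :: l).take t).count ((w :: l).getD t "") == 1)) ∘ Nat.succ)
        = (fun t => (((pre ++ [w]) ++ l.take t).count (l.getD t "") == 1)) := by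
      funext t
      simp [Function.comp, List.take_succ_cons, List.append_assoc]
    rw [hc]
    have hm : ∀ (ts : List Nat), (ts.map Nat.succ).map (fun t => (w :: l).getD t "")
        = ts.map (fun t => l.getD t "") := by
      intro ts; rw [List.map_map]; apply List.map_congr_left; intro t _; simp [Function.comp]
    simp only [List.take_zero, List.append_nil, List.getD_cons_zero, beq_iff_eq]
    rw [ih (pre ++ [w])]
    split_ifs with h
    · simp
    · simp

-- the second-occurrence list over Nat positions, cast to the Int-indexed form
lemma pvCastSec (ws : List String) :
    (pvSecIdx ws).map (pvVal ws)
      = ((List.range ws.length).filter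
          (fun t => ((ws.take t).count (ws.getD t "") == 1))).map (fun t => ws.getD t "") := by
  unfold pvSecIdx
  rw [PySem.List.pyRange_zero_natCast, List.filter_map, List.map_map]
  have hq : ((fun j => pvCnt ws j == 1) ∘ fun (t : Nat) => ((t : Int)))
      = (fun t => ((ws.take t).count (ws.getD t "") == 1)) := by
    funext t
    simp [Function.comp, pvCnt, pvVal, PySem.List.pyGetD_natCast]
  have hv : (pvVal ws ∘ fun (t : Nat) => ((t : Int))) = (fun t => ws.getD t "") := by
    funext t
    simp [Function.comp, pvVal, PySem.List.pyGetD_natCast]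
  rw [hq, hv]

lemma pvA_canon (s : String) (k : Int) :
    repeating_patterns_k_length s k = (pvSecIdx (pvWindows s k)).map (pvVal (pvWindows s k)) := by
  have h : repeating_patterns_k_length s k
      = (List.foldl pvStepA (PySem.Set.empty, PySem.Set.empty)
          ((PySem.List.pyRange (k - 1) (PySem.Str.len s) 1).map
            (fun i => PySem.Str.slice s (some (i - (k - 1))) (some (i + 1))))).2 := by
    rw [List.foldl_map]; rfl
  rw [h, pvReindexA, pvFoldA _ [] _ _ (by simp [PySem.Set.empty]) (by simp [PySem.Set.empty]),
    pvSecondList_eq, pvCastSec]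
  simp

-- countP of a list as countP over its positions
lemma pvCountP_getD_range {α : Type} (l : List α) (P : α → Bool) (d : α) :
    l.countP P = (List.range l.length).countP (fun t => P (l.getD t d)) := by
  induction l with
  | nil => simp
  | cons a l ih =>
    rw [List.countP_cons, List.length_cons, List.range_succ_eq_map, List.countP_cons,
      List.countP_map]
    have hc : ((fun t => P ((a :: l).getD t d)) ∘ Nat.succ) = (fun t => P (l.getD t d)) := by
      funext t; simp [Function.comp]
    rw [hc, List.getD_cons_zero, ih]


lemma pvCountP_range_lt (n m : Nat) (h : m ≤ n) (Q : Nat → Bool) :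
    (List.range n).countP (fun t => decide (t < m) && Q t) = (List.range m).countP Q := by
  have hn : n = m + (n - m) := by omega
  rw [hn, List.range_add, List.countP_append]
  have h2 : (List.map (fun i => m + i) (List.range (n - m))).countP
      (fun t => decide (t < m) && Q t) = 0 := by
    rw [List.countP_eq_zero]
    intro a ha
    simp only [List.mem_map] at ha
    obtain ⟨i, _, rfl⟩ := ha
    simp
  rw [h2, List.countP_congr]
  · ring
  · intro a ha
    simp only [List.mem_range] at ha
    simp [ha]


lemma pvIdxs_eq (ws : List String) : pvIdxs ws = List.map (fun t : Nat => (t : Int)) (List.range ws.length) := by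
  unfold pvIdxs; rw [PySem.List.pyRange_zero_natCast]

lemma pvIdxs_nodup (ws : List String) : (pvIdxs ws).Nodup := by
  rw [pvIdxs_eq]
  exact (List.nodup_range).map (fun a b => by exact_mod_cast id)

lemma pvOrder_perm (ws : List String) : (pvOrder ws).Perm (pvIdxs ws) :=
  PySem.List.sorted_perm _ _ _

lemma pvOrder_nodup (ws : List String) : (pvOrder ws).Nodup :=
  (pvOrder_perm ws).nodup_iff.mpr (pvIdxs_nodup ws)

lemma pvOrder_len (ws : List String) : (pvOrder ws).length = ws.length := by
  rw [(pvOrder_perm ws).length_eq, pvIdxs_eq, List.length_map, List.length_range]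

lemma pvKey_inj (ws : List String) (a b : Int) (h : pvKey ws a = pvKey ws b) : a = b := by
  unfold pvKey at h
  have := congrArg (fun x => (ofLex x).2) h
  simpa using this

lemma pvOrder_pw (ws : List String) :
    (pvOrder ws).Pairwise (fun a b => pvKey ws a < pvKey ws b) := by
  have h1 : (pvOrder ws).Pairwise (fun a b => pvKey ws a ≤ pvKey ws b) :=
    PySem.List.sorted_pairwise _ _
  have h2 : (pvOrder ws).Pairwise (fun a b => a ≠ b) := pvOrder_nodup ws
  exact (h1.and h2).imp (fun {a b} ⟨hle, hne⟩ =>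
    lt_of_le_of_ne hle (fun he => hne (pvKey_inj ws a b he)))

lemma pvOrder_pw_get (ws : List String) (p q : Nat) (hp : p < (pvOrder ws).length)
    (hq : q < (pvOrder ws).length) (hpq : p < q) :
    pvKey ws ((pvOrder ws).getD p 0) < pvKey ws ((pvOrder ws).getD q 0) := by
  rw [List.getD_eq_getElem _ _ hp, List.getD_eq_getElem _ _ hq]
  exact List.pairwise_iff_getElem.mp (pvOrder_pw ws) p q hp hq hpq

-- first component of the key is the window value: monotone along positions
lemma pvOrder_mono (ws : List String) (p q : Nat) (hq : q < (pvOrder ws).length) (hpq : p ≤ q) :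
    PySem.List.pyGetD ws ((pvOrder ws).getD p 0) "" ≤ PySem.List.pyGetD ws ((pvOrder ws).getD q 0) "" := by
  rcases Nat.eq_or_lt_of_le hpq with rfl | h
  · exact le_refl _
  · have := pvOrder_pw_get ws p q (lt_trans h hq) hq h
    rw [Prod.Lex.lt_iff] at this
    rcases this with h1 | ⟨h1, _⟩
    · exact le_of_lt h1
    · exact le_of_eq h1

-- the big counting chain
lemma pvCnt_pos (ws : List String) (p : Nat) (hp : p < (pvOrder ws).length) :
    pvCnt ws ((pvOrder ws).getD p 0)
      = (List.range p).countP
          (fun q => PySem.List.pyGetD ws ((pvOrder ws).getD q 0) ""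
             == PySem.List.pyGetD ws ((pvOrder ws).getD p 0) "") := by
  have hL : (pvOrder ws).length = ws.length := pvOrder_len ws
  set o := pvOrder ws with ho
  have hmem : o.getD p 0 ∈ pvIdxs ws := by
    have : o.getD p 0 ∈ o := by
      rw [List.getD_eq_getElem _ _ hp]
      exact List.getElem_mem _
    exact (pvOrder_perm ws).mem_iff.mp this
  obtain ⟨tj, htj, hjt⟩ : ∃ tj : Nat, tj < ws.length ∧ o.getD p 0 = (tj : Int) := by
    rw [pvIdxs_eq] at hmem
    obtain ⟨t, ht, h⟩ := List.mem_map.mp hmem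
    exact ⟨t, by simpa using List.mem_range.mp ht, h.symm⟩
  rw [hjt]
  set v := PySem.List.pyGetD ws ((tj : Int)) "" with hv
  -- step 1: count among the first tj windows, as countP over range tj
  have s1 : pvCnt ws ((tj : Int)) = (List.range tj).countP (fun t => ws.getD t "" == v) := by
    unfold pvCnt
    rw [List.count_eq_countP, pvCountP_getD_range (d := "")]
    have hlen : ((ws.take ((tj : Int)).toNat)).length = tj := by
      simp [List.length_take]; omega
    rw [hlen]
    apply List.countP_congr
    intro t ht
    have ht' : t < tj := List.mem_range.mp ht
    have hg : (ws.take ((tj : Int)).toNat).getD t "" = ws.getD t "" := by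
      rw [List.getD_eq_getElem?_getD, List.getD_eq_getElem?_getD, List.getElem?_take]
      simp [ht']
    rw [hg, hv]
    rfl
  -- step 2: widen to range n with a guard
  have s2 : (List.range tj).countP (fun t => ws.getD t "" == v)
      = (List.range ws.length).countP (fun t => decide (t < tj) && (ws.getD t "" == v)) :=
    (pvCountP_range_lt ws.length tj (le_of_lt htj) _).symm
  -- step 3: over the Int index list
  have s3 : (List.range ws.length).countP (fun t => decide (t < tj) && (ws.getD t "" == v))
      = (pvIdxs ws).countP (fun i => decide (i < (tj : Int)) && (PySem.List.pyGetD ws i "" == v)) := by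
    rw [pvIdxs_eq, List.countP_map]
    apply List.countP_congr
    intro t _
    simp [Function.comp, PySem.List.pyGetD_natCast]
  -- step 4: along the permutation, to the sorted order
  have s4 : (pvIdxs ws).countP (fun i => decide (i < (tj : Int)) && (PySem.List.pyGetD ws i "" == v))
      = o.countP (fun i => decide (i < (tj : Int)) && (PySem.List.pyGetD ws i "" == v)) :=
    (List.Perm.countP_eq _ (pvOrder_perm ws)).symm
  -- step 5: positions of the sorted order
  have s5 : o.countP (fun i => decide (i < (tj : Int)) && (PySem.List.pyGetD ws i "" == v))
      = (List.range o.length).countP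
          (fun q => decide (o.getD q 0 < (tj : Int)) && (PySem.List.pyGetD ws (o.getD q 0) "" == v)) :=
    pvCountP_getD_range o _ 0
  -- step 6: the guard is exactly "position before p"
  have s6 : (List.range o.length).countP
        (fun q => decide (o.getD q 0 < (tj : Int)) && (PySem.List.pyGetD ws (o.getD q 0) "" == v))
      = (List.range o.length).countP
          (fun q => decide (q < p) && (PySem.List.pyGetD ws (o.getD q 0) "" == v)) := by
    apply List.countP_congr
    intro q hq
    have hq' : q < o.length := List.mem_range.mp hq
    by_cases hvq : (PySem.List.pyGetD ws (o.getD q 0) "" == v) = true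
    · have hveq : PySem.List.pyGetD ws (o.getD q 0) "" = v := by simpa using hvq
      have hiff : (o.getD q 0 < (tj : Int)) ↔ (q < p) := by
        rw [← hjt]
        rcases lt_trichotomy q p with h | h | h
        · constructor
          · intro _; exact h
          · intro _
            have hk := pvOrder_pw_get ws q p hq' hp h
            rw [Prod.Lex.lt_iff] at hk
            simp only [pvKey, ofLex_toLex, ← ho] at hk
            rcases hk with hk | ⟨_, hk⟩
            · rw [hveq, hv, ← hjt] at hk
              exact absurd hk (lt_irrefl _)
            · exact hk
        · subst h
          exact ⟨fun hlt => absurd hlt (lt_irrefl _), fun hlt => absurd hlt (lt_irrefl _)⟩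
        · constructor
          · intro hlt
            have hk := pvOrder_pw_get ws p q hp hq' h
            rw [Prod.Lex.lt_iff] at hk
            simp only [pvKey, ofLex_toLex, ← ho] at hk
            rcases hk with hk | ⟨_, hk⟩
            · rw [hveq, hv, ← hjt] at hk
              exact absurd hk (lt_irrefl _)
            · exact absurd hlt (asymm hk)
          · intro hlt; omega
      rw [decide_eq_decide.mpr hiff]
    · simp only [Bool.not_eq_true] at hvq
      rw [hvq, Bool.and_false, Bool.and_false]
  -- step 7: drop the guard by shrinking the range
  have s7 : (List.range o.length).countP
        (fun q => decide (q < p) && (PySem.List.pyGetD ws (o.getD q 0) "" == v))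
      = (List.range p).countP (fun q => PySem.List.pyGetD ws (o.getD q 0) "" == v) :=
    pvCountP_range_lt o.length p (le_of_lt hp) _
  rw [s1, s2, s3, s4, s5, s6, s7]


lemma pvZero (ws : List String) (h0 : 0 < (pvOrder ws).length) :
    pvCnt ws ((pvOrder ws).getD 0 0) = 0 := by
  rw [pvCnt_pos ws 0 h0]; simp

lemma pvAdj (ws : List String) (p : Nat) (h1 : 1 ≤ p) (hp : p < (pvOrder ws).length) :
    (pvCondB ws (pvOrder ws) ((p : Nat) : Int) = true)
      ↔ pvCnt ws ((pvOrder ws).getD p 0) = 1 := by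
  rw [pvCnt_pos ws p hp]
  set o := pvOrder ws with ho
  have hc1 : ((p : Int) - 1) = (((p - 1 : Nat) : Int)) := by omega
  have hg1 : PySem.List.pyGetD o ((p : Int) - 1) 0 = o.getD (p - 1) 0 := by
    rw [hc1, PySem.List.pyGetD_natCast]
  have hgp : PySem.List.pyGetD o ((p : Nat) : Int) 0 = o.getD p 0 := by
    rw [PySem.List.pyGetD_natCast]
  rcases Nat.lt_or_ge p 2 with h2 | h2
  · -- p = 1
    have hp1 : p = 1 := by omega
    subst hp1
    have hd : decide (((1 : Nat) : Int) < 2) = true := by decide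
    unfold pvCondB
    rw [hg1, hgp, hd, Bool.true_or, Bool.and_true]
    rw [List.range_one]
    simp only [List.countP_cons, List.countP_nil]
    constructor
    · intro h; simp_all
    · intro h; simp_all
  · -- p ≥ 2
    have hd : decide (((p : Nat) : Int) < 2) = false := by
      simp; exact_mod_cast (by omega : (2 : Int) ≤ (p : Int))
    have hc2 : ((p : Int) - 2) = (((p - 2 : Nat) : Int)) := by omega
    have hg2 : PySem.List.pyGetD o ((p : Int) - 2) 0 = o.getD (p - 2) 0 := by
      rw [hc2, PySem.List.pyGetD_natCast]
    unfold pvCondB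
    rw [hg1, hg2, hgp, hd, Bool.false_or]
    have hmono := pvOrder_mono ws
    constructor
    · intro h
      rw [Bool.and_eq_true] at h
      obtain ⟨he, hne⟩ := h
      have hve : PySem.List.pyGetD ws (o.getD (p - 1) 0) "" = PySem.List.pyGetD ws (o.getD p 0) "" := by
        simpa using he
      have hvne : PySem.List.pyGetD ws (o.getD (p - 2) 0) "" ≠ PySem.List.pyGetD ws (o.getD p 0) "" := by
        simpa using hne
      have hsplit : p = (p - 1) + 1 := by omega
      have hr : List.range p = List.range (p - 1) ++ [p - 1] := by
        conv_lhs => rw [hsplit]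
        rw [List.range_succ]
      rw [hr, List.countP_append]
      have hlast : (List.countP
          (fun q => PySem.List.pyGetD ws (o.getD q 0) "" == PySem.List.pyGetD ws (o.getD p 0) "")
          [p - 1]) = 1 := by
        rw [List.countP_singleton]
        simp only [hve, beq_self_eq_true, if_true]
      have hzero : (List.countP
          (fun q => PySem.List.pyGetD ws (o.getD q 0) "" == PySem.List.pyGetD ws (o.getD p 0) "")
          (List.range (p - 1))) = 0 := by
        rw [List.countP_eq_zero]
        intro q hq
        have hq' : q < p - 1 := List.mem_range.mp hq
        simp only [beq_iff_eq]
        intro hqv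
        have hle1 : PySem.List.pyGetD ws (o.getD q 0) "" ≤ PySem.List.pyGetD ws (o.getD (p - 2) 0) "" := by
          rw [ho]; exact hmono q (p - 2) (by rw [← ho]; omega) (by omega)
        have hle2 : PySem.List.pyGetD ws (o.getD (p - 2) 0) "" ≤ PySem.List.pyGetD ws (o.getD p 0) "" := by
          rw [ho]; exact hmono (p - 2) p (by rw [← ho]; omega) (by omega)
        exact hvne (le_antisymm hle2 (hqv ▸ hle1))
      omega
    · intro h
      have hpos : 0 < (List.range p).countP
          (fun q => PySem.List.pyGetD ws (o.getD q 0) "" == PySem.List.pyGetD ws (o.getD p 0) "") := by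
        omega
      rw [List.countP_pos_iff] at hpos
      obtain ⟨q, hqmem, hqv⟩ := hpos
      have hq' : q < p := List.mem_range.mp hqmem
      have hqv' : PySem.List.pyGetD ws (o.getD q 0) "" = PySem.List.pyGetD ws (o.getD p 0) "" := by
        simpa using hqv
      have hle1 : PySem.List.pyGetD ws (o.getD q 0) "" ≤ PySem.List.pyGetD ws (o.getD (p - 1) 0) "" := by
        rw [ho]; exact hmono q (p - 1) (by rw [← ho]; omega) (by omega)
      have hle2 : PySem.List.pyGetD ws (o.getD (p - 1) 0) "" ≤ PySem.List.pyGetD ws (o.getD p 0) "" := by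
        rw [ho]; exact hmono (p - 1) p (by rw [← ho]; omega) (by omega)
      have hve : PySem.List.pyGetD ws (o.getD (p - 1) 0) "" = PySem.List.pyGetD ws (o.getD p 0) "" :=
        le_antisymm hle2 (hqv' ▸ hle1)
      have hvne : PySem.List.pyGetD ws (o.getD (p - 2) 0) "" ≠ PySem.List.pyGetD ws (o.getD p 0) "" := by
        intro hcon
        have hs1 : p = ((p - 2) + 1) + 1 := by omega
        have e1 : (p - 2) + 1 = p - 1 := by omega
        have hr2 : List.range p = (List.range (p - 2) ++ [p - 2]) ++ [p - 1] := by
          conv_lhs => rw [hs1]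
          rw [List.range_succ, List.range_succ, e1]
        have hc : (List.range p).countP
            (fun q => PySem.List.pyGetD ws (o.getD q 0) "" == PySem.List.pyGetD ws (o.getD p 0) "")
            = (List.range (p - 2)).countP
                (fun q => PySem.List.pyGetD ws (o.getD q 0) "" == PySem.List.pyGetD ws (o.getD p 0) "")
              + 2 := by
          rw [hr2, List.countP_append, List.countP_append, List.countP_singleton,
            List.countP_singleton]
          simp only [hcon, hve, beq_self_eq_true, if_true]
        omega
      rw [Bool.and_eq_true]
      refine ⟨beq_iff_eq.mpr hve, ?_⟩
      rw [Bool.not_eq_eq_eq_not]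
      simp only [Bool.not_true, beq_eq_false_iff_ne, ne_eq]
      exact hvne


lemma pvRange1_eq (L : Nat) :
    PySem.List.pyRange 1 ((L : Int)) 1
      = (List.range (L - 1)).map (fun t : Nat => (((t + 1 : Nat)) : Int)) := by
  rw [PySem.List.pyRange_one]
  have h : ((L : Int) - 1).toNat = L - 1 := by omega
  rw [h]
  apply List.map_congr_left
  intro t _
  push_cast
  ring

lemma pvSeconds_eq (ws : List String) :
    pvSeconds ws
      = ((List.range ((pvOrder ws).length - 1)).filter
          (fun t => pvCondB ws (pvOrder ws) (((t + 1 : Nat)) : Int))).map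
          (fun t => (pvOrder ws).getD (t + 1) 0) := by
  unfold pvSeconds
  rw [pvRange1_eq, List.filter_map, List.map_map]
  congr 1
  funext t
  simp only [Function.comp]
  rw [PySem.List.pyGetD_natCast]

lemma pvSeconds_nodup (ws : List String) : (pvSeconds ws).Nodup := by
  rw [pvSeconds_eq]
  apply List.Nodup.map_on
  · intro x hx y hy hxy
    have hx' : x < (pvOrder ws).length - 1 := List.mem_range.mp (List.mem_of_mem_filter hx)
    have hy' : y < (pvOrder ws).length - 1 := List.mem_range.mp (List.mem_of_mem_filter hy)
    have hx1 : x + 1 < (pvOrder ws).length := by omega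
    have hy1 : y + 1 < (pvOrder ws).length := by omega
    rw [List.getD_eq_getElem _ _ hx1, List.getD_eq_getElem _ _ hy1] at hxy
    have := ((pvOrder_nodup ws).getElem_inj_iff).mp hxy
    omega
  · exact List.Nodup.filter _ List.nodup_range

lemma pvSeconds_mem (ws : List String) (j : Int) : j ∈ pvSeconds ws ↔ j ∈ pvSecIdx ws := by
  rw [pvSeconds_eq]
  have hmemo : ∀ x, x ∈ pvIdxs ws ↔ x ∈ pvOrder ws := fun x => ((pvOrder_perm ws).mem_iff).symm
  constructor
  · intro h
    obtain ⟨t, ht, rfl⟩ := List.mem_map.mp h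
    have hcond := (List.mem_filter.mp ht).2
    have ht' : t < (pvOrder ws).length - 1 := List.mem_range.mp (List.mem_of_mem_filter ht)
    have hp : t + 1 < (pvOrder ws).length := by omega
    have hcnt : pvCnt ws ((pvOrder ws).getD (t + 1) 0) = 1 :=
      (pvAdj ws (t + 1) (by omega) hp).mp hcond
    unfold pvSecIdx
    rw [List.mem_filter]
    refine ⟨?_, by simpa using hcnt⟩
    rw [show (PySem.List.pyRange 0 ((ws.length : Int)) 1) = pvIdxs ws from rfl, hmemo]
    rw [List.getD_eq_getElem _ _ hp]
    exact List.getElem_mem _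
  · intro h
    unfold pvSecIdx at h
    rw [List.mem_filter] at h
    obtain ⟨hmem, hcnt⟩ := h
    have hcnt' : pvCnt ws j = 1 := by simpa using hcnt
    rw [show (PySem.List.pyRange 0 ((ws.length : Int)) 1) = pvIdxs ws from rfl, hmemo] at hmem
    obtain ⟨p, hp, hpe⟩ := List.mem_iff_getElem.mp hmem
    have hp0 : p ≠ 0 := by
      intro h0
      subst h0
      have := pvZero ws (by omega)
      rw [List.getD_eq_getElem _ _ hp, hpe] at this
      omega
    have hcond : pvCondB ws (pvOrder ws) (((p : Nat)) : Int) = true := by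
      apply (pvAdj ws p (by omega) hp).mpr
      rw [List.getD_eq_getElem _ _ hp, hpe]
      exact hcnt'
    apply List.mem_map.mpr
    refine ⟨p - 1, ?_, ?_⟩
    · apply List.mem_filter.mpr
      refine ⟨List.mem_range.mpr (by omega), ?_⟩
      have he : p - 1 + 1 = p := by omega
      rw [he]
      exact hcond
    · have he : p - 1 + 1 = p := by omega
      rw [he, List.getD_eq_getElem _ _ hp, hpe]

lemma pvSecIdx_nodup (ws : List String) : (pvSecIdx ws).Nodup :=
  List.Nodup.filter _ (pvIdxs_nodup ws)

lemma pvSecIdx_pw (ws : List String) : (pvSecIdx ws).Pairwise (fun a b => a < b) := by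
  apply List.Pairwise.filter
  rw [show (PySem.List.pyRange 0 ((ws.length : Int)) 1) = pvIdxs ws from rfl, pvIdxs_eq]
  apply List.pairwise_map.mpr
  exact List.pairwise_lt_range.imp (fun h => by exact_mod_cast h)

lemma pvSortSeconds (ws : List String) :
    PySem.List.sorted (pvSeconds ws) (fun j => j) = pvSecIdx ws := by
  apply PySem.List.sorted_eq_of_perm_of_pairwise_lt
  · exact (List.perm_ext_iff_of_nodup (pvSecIdx_nodup ws) (pvSeconds_nodup ws)).mpr
      (fun a => (pvSeconds_mem ws a).symm)
  · exact pvSecIdx_pw ws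

lemma pvSorted2_eq (ws : List String) (xs : List Int) :
    PySem.List.sorted2 xs (fun j => PySem.List.pyGetD ws j "") (fun j => j)
      = PySem.List.sorted xs (fun j => toLex (PySem.List.pyGetD ws j "", j)) := by
  show List.foldl _ [] xs = List.foldl _ [] xs
  have hbe : (fun (a b : Int) => decide (PySem.List.pyGetD ws a "" < PySem.List.pyGetD ws b "")
        || !decide (PySem.List.pyGetD ws b "" < PySem.List.pyGetD ws a "") && decide (a < b))
      = (fun (a b : Int) => decide (toLex (PySem.List.pyGetD ws a "", a) < toLex (PySem.List.pyGetD ws b "", b))) := by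
    funext a b
    by_cases h1 : PySem.List.pyGetD ws a "" < PySem.List.pyGetD ws b ""
    · simp [h1, Prod.Lex.lt_iff, asymm h1]
    · by_cases h2 : PySem.List.pyGetD ws b "" < PySem.List.pyGetD ws a ""
      · simp [h1, h2, Prod.Lex.lt_iff, ne_of_gt h2]
      · have heq : PySem.List.pyGetD ws a "" = PySem.List.pyGetD ws b "" := le_antisymm (not_lt.mp h2) (not_lt.mp h1)
        by_cases h3 : a < b <;> simp [h3, Prod.Lex.lt_iff, heq]
  simp only [Bool.false_eq_true, if_false]
  rw [hbe]


lemma pvFoldB (ws : List String) (order : List Int) :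
    (PySem.List.pyRange 1 ((order.length : Int)) 1).foldl
      (fun (acc : List Int) i =>
        if (PySem.List.pyGetD ws (PySem.List.pyGetD order (i - 1) 0) ""
              == PySem.List.pyGetD ws (PySem.List.pyGetD order i 0) "")
           && (decide (i < 2)
              || !(PySem.List.pyGetD ws (PySem.List.pyGetD order (i - 2) 0) ""
                    == PySem.List.pyGetD ws (PySem.List.pyGetD order i 0) ""))
        then acc ++ [PySem.List.pyGetD order i 0] else acc) []
      = ((PySem.List.pyRange 1 ((order.length : Int)) 1).filter (pvCondB ws order)).map
          (fun i => PySem.List.pyGetD order i 0) :=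
  PySem.List.foldl_append_if (pvCondB ws order) (fun i => PySem.List.pyGetD order i 0) _ []


lemma pvB_canon (s : String) (k : Int) :
    repeating_patterns_k_length_alt s k
      = (pvSecIdx (pvWindows s k)).map (pvVal (pvWindows s k)) := by
  unfold repeating_patterns_k_length_alt
  simp only [pvReindexB]
  set ws := pvWindows s k with hws
  have horder : PySem.List.sorted2 (PySem.List.pyRange 0 ((ws.length : Int)) 1)
      (fun j => PySem.List.pyGetD ws j "") (fun j => j) = pvOrder ws := by
    rw [pvSorted2_eq]; rfl
  rw [horder, pvFoldB]
  rw [show (List.map (fun i => PySem.List.pyGetD (pvOrder ws) i 0)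
      (List.filter (pvCondB ws (pvOrder ws))
        (PySem.List.pyRange 1 (((pvOrder ws).length : Int)) 1))) = pvSeconds ws from rfl]
  rw [pvSortSeconds]
  rfl

-- ===== VERDICT (by name: the statement is the Claim_ definition above) =====
theorem repeating_patterns_k_length_spec : Claim_equal_repeating_patterns_k_length := by
  intro s k _
  unfold Spec_repeating_patterns_k_length
  rw [pvA_canon, pvB_canon]
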